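-- pv_equiv track=rewrite | github.com/markJr18/SeaGrant-Capstone- | rag_code/ret_summ.py | _best_chunk
-- ===== SOURCE A (Python) =====
-- def _best_chunk(chunks: list[str], keywords: list[str]) -> str:
--     """Return chunk with highest keyword density."""
--     if not chunks:
--         return ""
--     kw_set = {kw.lower() for kw in keywords}
--     scored = []
--     for chunk in chunks:
--         lower = chunk.lower()
--         hits = sum(1 for kw in kw_set if kw in lower)
--         scored.append((hits, chunk))
--     scored.sort(key=lambda x: -x[0])
--     return scored[0][1]
-- ===== SOURCE B (Python) =====
-- def _best_chunk(chunks: list[str], keywords: list[str]) -> str: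
--     """Return chunk with highest keyword density (single running-max scan)."""
--     if not chunks:
--         return ""
--     kw_set = {kw.lower() for kw in keywords}
--     best_chunk = chunks[0]
--     best_score = sum(1 for kw in kw_set if kw in chunks[0].lower())
--     for chunk in chunks[1:]:
--         score = sum(1 for kw in kw_set if kw in chunk.lower())
--         if score > best_score:
--             best_chunk, best_score = chunk, score
--     return best_chunk
-- ===== Notes on version B (the rewrite author's own statement) =====
-- stated objective: simpler
-- what changed: Replaces build-a-scored-list-then-stable-sort-and-take-first with a single running-max scan that keeps the current best chunk and score, updating only on strictly greater score so the first maximal chunk still wins.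
import Mathlib
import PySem

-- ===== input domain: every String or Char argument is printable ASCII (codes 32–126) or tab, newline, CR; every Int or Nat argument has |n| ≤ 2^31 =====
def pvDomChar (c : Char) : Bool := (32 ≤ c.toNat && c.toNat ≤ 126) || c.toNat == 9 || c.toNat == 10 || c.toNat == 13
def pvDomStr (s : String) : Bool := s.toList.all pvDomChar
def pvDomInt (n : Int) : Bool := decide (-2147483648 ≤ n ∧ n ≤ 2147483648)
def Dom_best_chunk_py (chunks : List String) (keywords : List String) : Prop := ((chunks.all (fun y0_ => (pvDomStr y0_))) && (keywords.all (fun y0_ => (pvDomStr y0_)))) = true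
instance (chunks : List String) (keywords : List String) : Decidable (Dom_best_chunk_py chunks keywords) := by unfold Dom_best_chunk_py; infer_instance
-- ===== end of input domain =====

-- B replaces A's scored-list + stable sort + take-first with a single running-max scan (simpler; same cost class).

-- ===== PORT A =====
-- hits = sum(1 for kw in kw_set if kw in lower)  (order-independent count over the set)
def pvHits (kwSet : List String) (lower : String) : Int :=
  kwSet.foldl (fun s kw => if PySem.Str.isIn kw lower then s + 1 else s) 0

def best_chunk_py (chunks : List String) (keywords : List String) : String :=
  if chunks = [] then ""
  else
    let kwSet := PySem.Set.ofList (keywords.map (fun kw => PySem.Str.lower kw))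
    let scored := chunks.foldl (fun acc chunk => acc ++ [(pvHits kwSet (PySem.Str.lower chunk), chunk)]) ([] : List (Int × String))
    match PySem.List.sorted scored (fun x => -x.1) false with
    | [] => ""
    | s :: _ => s.2

-- ===== PORT B =====
def best_chunk_py_alt (chunks : List String) (keywords : List String) : String :=
  match chunks with
  | [] => ""
  | c :: rest =>
    let kwSet := PySem.Set.ofList (keywords.map (fun kw => PySem.Str.lower kw))
    let res := rest.foldl
      (fun (best : String × Int) chunk =>
        let score := pvHits kwSet (PySem.Str.lower chunk)
        if score > best.2 then (chunk, score) else best)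
      (c, pvHits kwSet (PySem.Str.lower c))
    res.1

-- ===== PRECONDITION & SPEC =====
def Spec_best_chunk_py (chunks : List String) (keywords : List String) (out : String) : Prop := out = best_chunk_py_alt chunks keywords
instance (chunks : List String) (keywords : List String) (out : String) : Decidable (Spec_best_chunk_py chunks keywords out) := by unfold Spec_best_chunk_py; infer_instance

-- ===== CLAIM (what is proved, stated in full; the proofs are below) =====
def Claim_equal_best_chunk_py : Prop := ∀ (chunks : List String) (keywords : List String), Dom_best_chunk_py chunks keywords → Spec_best_chunk_py chunks keywords (best_chunk_py chunks keywords)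

-- ===== LEMMAS AND PROOFS =====

-- head of the insertion-sort fold = running first-minimum of the key
lemma head_foldl_insertBy (key : Int × String → Int) (xs : List (Int × String))
    (a : Int × String) (t : List (Int × String)) :
    ∃ t', xs.foldl (fun acc x => PySem.List.insertBy (fun p q => decide (key p < key q)) x acc) (a :: t)
            = (xs.foldl (fun m y => if key y < key m then y else m) a) :: t' := by
  induction xs generalizing a t with
  | nil => exact ⟨t, rfl⟩
  | cons x xs ih =>
    simp only [List.foldl_cons, PySem.List.insertBy]
    by_cases h : key x < key a
    · simp only [h, decide_true]
      exact ih x (a :: t)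
    · simp only [h, decide_false]
      exact ih a _


theorem best_chunk_py_spec : Claim_equal_best_chunk_py := by
  intro chunks keywords _
  unfold Spec_best_chunk_py best_chunk_py best_chunk_py_alt
  cases chunks with
  | nil => rfl
  | cons c rest =>
    simp only [List.cons_ne_nil, reduceIte]
    set kwSet := PySem.Set.ofList (keywords.map (fun kw => PySem.Str.lower kw)) with hkw
    rw [PySem.List.foldl_append_singleton_eq_map]
    rw [PySem.List.sorted_eq_foldl_insertBy]
    simp only [List.nil_append, List.map_cons, List.foldl_cons, PySem.List.insertBy]
    obtain ⟨t', ht⟩ := head_foldl_insertBy (fun x => -x.1)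
      (rest.map (fun chunk => (pvHits kwSet (PySem.Str.lower chunk), chunk)))
      (pvHits kwSet (PySem.Str.lower c), c) []
    rw [ht]
    rw [List.foldl_map]
    have : ∀ (l : List String) (m : Int × String),
        (l.foldl (fun (m : Int × String) y =>
            if (fun x => -x.1) (pvHits kwSet (PySem.Str.lower y), y) < (fun x => -x.1) m
            then (pvHits kwSet (PySem.Str.lower y), y) else m) m).2
        = (l.foldl (fun (best : String × Int) chunk =>
            if pvHits kwSet (PySem.Str.lower chunk) > best.2
            then (chunk, pvHits kwSet (PySem.Str.lower chunk)) else best) (m.2, m.1)).1 := by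
      intro l
      induction l with
      | nil => intro m; rfl
      | cons y l ihl =>
        intro m
        simp only [List.foldl_cons]
        by_cases h : pvHits kwSet (PySem.Str.lower y) > m.1
        · rw [if_pos (by omega), if_pos (by simpa using h)]
          exact ihl _
        · rw [if_neg (by omega), if_neg (by simpa using h)]
          exact ihl m
    exact this rest _

-- ===== VERDICT (by name: the statement is the Claim_ definition above) =====
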